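-- pv_equiv track=rewrite | github.com/gaborszita/rpi-maze-solver | mazesolver1.py | pathsortener
-- ===== SOURCE A (Python) =====
-- def pathsortener(path):
--     found = True
--     while found == True:
--         found = False
--         for i in range(0, len(path)-2):
--             if path[i:i+3] == ['L', 'B', 'R']:
--                 path[i] = 'B'
--                 path[i+1] = 'NULL'
--                 path[i+2] = 'NULL'
--                 found = True
--                 break
--             elif path[i:i+3] == ['L', 'B', 'S']:
--                 path[i] = 'R'
--                 path[i+1] = 'NULL'
--                 path[i+2] = 'NULL'
--                 found = True
--                 break
--             elif path[i:i+3] == ['R', 'B', 'L']: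
--                 path[i] = 'B'
--                 path[i+1] = 'NULL'
--                 path[i+2] = 'NULL'
--                 found = True
--                 break
--             elif path[i:i+3] == ['S', 'B', 'L']:
--                 path[i] = 'R'
--                 path[i+1] = 'NULL'
--                 path[i+2] = 'NULL'
--                 found = True
--                 break
--             elif path[i:i+3] == ['S', 'B', 'S']:
--                 path[i] = 'B'
--                 path[i+1] = 'NULL'
--                 path[i+2] = 'NULL'
--                 found = True
--                 break
--             elif path[i:i+3] == ['L', 'B', 'L']:
--                 path[i] = 'S'
--                 path[i+1] = 'NULL'
--                 path[i+2] = 'NULL'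
--                 found = True
--                 break
--         if found == True:
--             path.remove('NULL')
--             path.remove('NULL')
--     return path
-- ===== SOURCE B (Python) =====
-- # Single left-to-right pass with a stack, collapsing the top 3 symbols whenever
-- # they match a rule.  Mutates path in place (path[:] = result) like A and
-- # returns it.
-- _RULES = {
--     ('L', 'B', 'R'): 'B',
--     ('L', 'B', 'S'): 'R',
--     ('R', 'B', 'L'): 'B',
--     ('S', 'B', 'L'): 'R',
--     ('S', 'B', 'S'): 'B',
--     ('L', 'B', 'L'): 'S',
-- }
--
-- def pathsortener(path):
--     stack = []
--     for sym in path: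
--         stack.append(sym)
--         while len(stack) >= 3:
--             r = _RULES.get((stack[-3], stack[-2], stack[-1]))
--             if r is None:
--                 break
--             del stack[-3:]
--             stack.append(r)
--     path[:] = stack
--     return path
-- ===== Notes on version B (the rewrite author's own statement) =====
-- stated objective: faster
-- what changed: A rescans the whole list from the start after every single collapse (and pays two linear remove('NULL') passes per collapse); B makes one left-to-right pass with a stack, collapsing the top three symbols whenever they match a rule, which yields the same leftmost-first reduction order.
-- outside the precondition, e.g. on pathsortener(['NULL', 'L', 'B', 'R']): A returns ['B', 'NULL'], B returns ['NULL', 'B']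
import Mathlib
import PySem

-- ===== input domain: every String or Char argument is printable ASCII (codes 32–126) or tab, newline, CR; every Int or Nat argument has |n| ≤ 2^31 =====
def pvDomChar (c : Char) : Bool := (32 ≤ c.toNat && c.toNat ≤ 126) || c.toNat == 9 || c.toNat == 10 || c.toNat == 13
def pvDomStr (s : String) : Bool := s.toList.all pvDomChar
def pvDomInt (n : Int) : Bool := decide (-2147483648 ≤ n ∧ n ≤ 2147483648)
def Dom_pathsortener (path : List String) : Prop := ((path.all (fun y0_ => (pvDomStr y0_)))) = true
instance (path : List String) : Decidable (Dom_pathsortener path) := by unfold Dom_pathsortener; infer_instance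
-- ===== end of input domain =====

-- B replaces A's rescan-from-the-start loop by a single left-to-right pass with a
-- stack (objective: faster).  Equivalence is about the return value; both Pythons
-- also mutate `path` in place to that same value.

-- ===== PORT A =====
-- the inner `for i in range(0, len(path)-2)` loop: returns the mutated list at
-- the first matching window (Python's break), none when no window matches
def scanA (path : List String) (i : Nat) : Option (List String) :=
  if _h : i < path.length - 2 then
    let seg := PySem.List.slice path (some (i : Int)) (some ((i : Int) + 3))
    if seg = ["L", "B", "R"] then
      some (((path.set i "B").set (i+1) "NULL").set (i+2) "NULL")
    else if seg = ["L", "B", "S"] then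
      some (((path.set i "R").set (i+1) "NULL").set (i+2) "NULL")
    else if seg = ["R", "B", "L"] then
      some (((path.set i "B").set (i+1) "NULL").set (i+2) "NULL")
    else if seg = ["S", "B", "L"] then
      some (((path.set i "R").set (i+1) "NULL").set (i+2) "NULL")
    else if seg = ["S", "B", "S"] then
      some (((path.set i "B").set (i+1) "NULL").set (i+2) "NULL")
    else if seg = ["L", "B", "L"] then
      some (((path.set i "S").set (i+1) "NULL").set (i+2) "NULL")
    else scanA path (i+1)
  else none
termination_by path.length - 2 - i
decreasing_by exact Nat.sub_succ_lt_self _ _ _h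

-- the `while found` loop; the fuel argument is a totality guard only: every
-- iteration removes two elements, so len(path)+1 iterations are never exhausted
def pathsortenerLoop : Nat → List String → List String
  | 0, path => path
  | fuel+1, path =>
    match scanA path 0 with
    | none => path
    | some p =>
      match PySem.List.remove? p "NULL" with
      | none => p  -- unreachable: the two "NULL" markers were just written
      | some p1 =>
        match PySem.List.remove? p1 "NULL" with
        | none => p1  -- unreachable likewise
        | some p2 => pathsortenerLoop fuel p2

def pathsortener (path : List String) : List String :=
  pathsortenerLoop (path.length + 1) path

-- ===== PORT B =====
-- _RULES.get on the literal dict, ported as a first-match conditional chain (exact)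
def rule (a b c : String) : Option String :=
  if a = "L" ∧ b = "B" ∧ c = "R" then some "B"
  else if a = "L" ∧ b = "B" ∧ c = "S" then some "R"
  else if a = "R" ∧ b = "B" ∧ c = "L" then some "B"
  else if a = "S" ∧ b = "B" ∧ c = "L" then some "R"
  else if a = "S" ∧ b = "B" ∧ c = "S" then some "B"
  else if a = "L" ∧ b = "B" ∧ c = "L" then some "S"
  else none

-- the inner `while`: stack held top-first; collapse the top 3 while they match
def reduceTop : List String → List String
  | c :: b :: a :: t =>
    match rule a b c with
    | some d => reduceTop (d :: t)
    | none => c :: b :: a :: t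
  | s => s
termination_by l => l.length
decreasing_by
  simp only [List.length_cons]
  exact Nat.lt_trans (Nat.lt_succ_self _) (Nat.lt_succ_self _)

def pathsortener_alt (path : List String) : List String :=
  (path.foldl (fun st sym => reduceTop (sym :: st)) []).reverse

-- ===== PRECONDITION & SPEC =====
-- Pre_ excludes paths that already contain the string "NULL": A uses "NULL" as its
-- internal deletion sentinel, so path.remove('NULL') may then delete a caller's
-- element instead of the freshly written marker — an accidental corner no caller
-- would specify either way.
def Pre_pathsortener (path : List String) : Prop := "NULL" ∉ path
instance (path : List String) : Decidable (Pre_pathsortener path) := by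
  unfold Pre_pathsortener; infer_instance
def pvWitness_pathsortener : List String := ["L", "B", "R"]
def Spec_pathsortener (path : List String) (out : List String) : Prop := out = pathsortener_alt path
instance (path : List String) (out : List String) : Decidable (Spec_pathsortener path out) := by unfold Spec_pathsortener; infer_instance

-- ===== CLAIM (what is proved, stated in full; the proofs are below) =====
def Claim_equal_pathsortener : Prop := ∀ (path : List String), Dom_pathsortener path → Pre_pathsortener path → Spec_pathsortener path (pathsortener path)

-- ===== LEMMAS AND PROOFS =====

theorem pvRemoveLen {xs r : List String} {v : String}
    (h : PySem.List.remove? xs v = some r) : r.length + 1 = xs.length := by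
  have hv : v ∈ xs := by
    by_contra hv
    rw [← PySem.List.remove?_eq_none_iff xs v] at hv
    rw [hv] at h
    cases h
  rw [PySem.List.remove?_eq_some_erase xs v hv] at h
  injection h with h
  rw [← h, List.length_erase_of_mem hv,
      Nat.sub_add_cancel (Nat.succ_le_of_lt (List.length_pos_of_mem hv))]

theorem pvScanLen : ∀ (path : List String) (i : Nat) (p : List String),
    scanA path i = some p → p.length = path.length := by
  intro path
  have main : ∀ (n i : Nat) (p : List String), path.length - 2 - i ≤ n →
      scanA path i = some p → p.length = path.length := by
    intro n
    induction n with
    | zero =>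
      intro i p hle hs
      rw [scanA] at hs
      rw [dif_neg (by omega)] at hs
      cases hs
    | succ n ih =>
      intro i p hle hs
      by_cases hlt : i < path.length - 2
      · rw [scanA, dif_pos hlt] at hs
        simp only [] at hs
        split_ifs at hs <;>
          first
          | (cases hs; simp only [List.length_set])
          | exact ih (i+1) p (by omega) hs
      · rw [scanA, dif_neg hlt] at hs; cases hs
  intro i p hs
  exact main (path.length - 2 - i) i p le_rfl hs

theorem pvLoopSucc (fuel : Nat) (path : List String) :
    pathsortenerLoop (fuel+1) path =
      match scanA path 0 with
      | none => path
      | some p =>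
        match PySem.List.remove? p "NULL" with
        | none => p
        | some p1 =>
          match PySem.List.remove? p1 "NULL" with
          | none => p1
          | some p2 => pathsortenerLoop fuel p2 := rfl

theorem pvLoopNone (fuel : Nat) (path : List String) (hs : scanA path 0 = none) :
    pathsortenerLoop (fuel+1) path = path := by
  rw [pvLoopSucc, hs]

theorem pvLoopSome1 (fuel : Nat) (path : List String) (p : List String)
    (hs : scanA path 0 = some p)
    (h1 : PySem.List.remove? p "NULL" = none) :
    pathsortenerLoop (fuel+1) path = p := by
  rw [pvLoopSucc]
  simp only [hs, h1]

theorem pvLoopSome2 (fuel : Nat) (path : List String) (p p1 : List String)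
    (hs : scanA path 0 = some p)
    (h1 : PySem.List.remove? p "NULL" = some p1)
    (h2 : PySem.List.remove? p1 "NULL" = none) :
    pathsortenerLoop (fuel+1) path = p1 := by
  rw [pvLoopSucc]
  simp only [hs, h1, h2]

theorem pvLoopSome (fuel : Nat) (path p p1 p2 : List String)
    (hs : scanA path 0 = some p)
    (h1 : PySem.List.remove? p "NULL" = some p1)
    (h2 : PySem.List.remove? p1 "NULL" = some p2) :
    pathsortenerLoop (fuel+1) path = pathsortenerLoop fuel p2 := by
  rw [pvLoopSucc]
  simp only [hs, h1, h2]

theorem pvLoopStable : ∀ (fuel : Nat) (l : List String), l.length ≤ 2 * fuel →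
    pathsortenerLoop (fuel+1) l = pathsortenerLoop fuel l := by
  intro fuel
  induction fuel with
  | zero =>
    intro l hl
    have hnil : l = [] := List.eq_nil_of_length_eq_zero (Nat.le_zero.mp hl)
    subst hnil
    have hs : scanA [] 0 = none := by rw [scanA]; rfl
    rw [pvLoopNone 0 [] hs]
    rfl
  | succ fuel ih =>
    intro l hl
    cases hs : scanA l 0 with
    | none => rw [pvLoopNone _ _ hs, pvLoopNone _ _ hs]
    | some p =>
      cases h1 : PySem.List.remove? p "NULL" with
      | none => rw [pvLoopSome1 _ _ _ hs h1, pvLoopSome1 _ _ _ hs h1]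
      | some p1 =>
        cases h2 : PySem.List.remove? p1 "NULL" with
        | none => rw [pvLoopSome2 _ _ _ _ hs h1 h2, pvLoopSome2 _ _ _ _ hs h1 h2]
        | some p2 =>
          rw [pvLoopSome _ _ _ _ _ hs h1 h2, pvLoopSome _ _ _ _ _ hs h1 h2]
          apply ih
          have e := pvScanLen l 0 p hs
          have e1 := pvRemoveLen h1
          have e2 := pvRemoveLen h2
          omega

-- the rewrite rule A applies at window j (as B's `rule` reads it)
def pvRedexAt (l : List String) (j : Nat) : Option String :=
  match l.drop j with
  | a :: b :: c :: _ => rule a b c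
  | _ => none

-- "no window matches anywhere"
def pvNF (l : List String) : Prop := ∀ j : Nat, pvRedexAt l j = none

theorem pvRule_ne_null {a b c d : String} (h : rule a b c = some d) : d ≠ "NULL" := by
  unfold rule at h
  split_ifs at h <;> (cases h; decide)

theorem pvRedexAt_short {l : List String} {j : Nat} (h : l.length < j + 3) :
    pvRedexAt l j = none := by
  unfold pvRedexAt
  have hlt : (l.drop j).length < 3 := by simp; omega
  cases hd : l.drop j with
  | nil => rfl
  | cons a t =>
    cases t with
    | nil => rfl
    | cons b t2 =>
      cases t2 with
      | nil => rfl
      | cons c t3 => rw [hd] at hlt; simp at hlt; omega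

theorem pvRedexAt_append {l r : List String} {j : Nat} (h : j + 3 ≤ l.length) :
    pvRedexAt (l ++ r) j = pvRedexAt l j := by
  unfold pvRedexAt
  rw [List.drop_append_of_le_length (by omega)]
  have hlen : 3 ≤ (l.drop j).length := by simp; omega
  cases hd : l.drop j with
  | nil => rw [hd] at hlen; simp at hlen
  | cons a t =>
    cases t with
    | nil => rw [hd] at hlen; simp at hlen
    | cons b t2 =>
      cases t2 with
      | nil => rw [hd] at hlen; simp at hlen
      | cons c t3 => simp

theorem pvNF_of_append {l r : List String} (h : pvNF (l ++ r)) : pvNF l := by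
  intro j
  by_cases hj : j + 3 ≤ l.length
  · rw [← pvRedexAt_append (r := r) hj]; exact h j
  · exact pvRedexAt_short (by omega)

theorem pvNF_snoc {l : List String} {x : String} (h : pvNF l)
    (h2 : ∀ a b, l.drop (l.length - 2) = [a, b] → rule a b x = none) :
    pvNF (l ++ [x]) := by
  intro j
  rcases lt_trichotomy (j + 3) (l.length + 1) with hj | hj | hj
  · rw [pvRedexAt_append (by omega)]; exact h j
  · have hje : j = l.length - 2 := by omega
    have hdl : (l.drop j).length = 2 := by simp; omega
    cases hd : l.drop j with
    | nil => rw [hd] at hdl; simp at hdl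
    | cons a t =>
      cases t with
      | nil => rw [hd] at hdl; simp at hdl
      | cons b t2 =>
        cases t2 with
        | cons c t3 => rw [hd] at hdl; simp at hdl
        | nil =>
          unfold pvRedexAt
          rw [List.drop_append_of_le_length (by omega), hd]
          simp
          exact h2 a b (by rw [← hje, hd])
  · exact pvRedexAt_short (by simp; omega)

-- one step of A's scan loop, phrased through pvRedexAt
theorem pvScan_step (path : List String) (i : Nat) (h : i + 2 < path.length) :
    scanA path i =
      match pvRedexAt path i with
      | some d => some (((path.set i d).set (i+1) "NULL").set (i+2) "NULL")
      | none => scanA path (i+1) := by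
  have hlen : 3 ≤ (path.drop i).length := by simp; omega
  cases hd : path.drop i with
  | nil => rw [hd] at hlen; simp at hlen
  | cons a t =>
    cases t with
    | nil => rw [hd] at hlen; simp at hlen
    | cons b t2 =>
      cases t2 with
      | nil => rw [hd] at hlen; simp at hlen
      | cons c t3 =>
        have hseg : PySem.List.slice path (some (i : Int)) (some ((i : Int) + 3))
            = [a, b, c] := by
          have := PySem.List.slice_natCast_add path i 3
          push_cast at this
          rw [this, hd]
          rfl
        rw [scanA]
        rw [dif_pos (by omega)]
        simp only [hseg, pvRedexAt, hd, rule, List.cons.injEq, and_true]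
        split_ifs <;> simp_all

theorem pvScan_none (l : List String)
    (h : ∀ j : Nat, pvRedexAt l j = none) : ∀ i : Nat, scanA l i = none := by
  intro i
  have main : ∀ (n i : Nat), l.length - 2 - i ≤ n → scanA l i = none := by
    intro n
    induction n with
    | zero => intro i hle; rw [scanA, dif_neg (by omega)]
    | succ n ih =>
      intro i hle
      by_cases hlt : i < l.length - 2
      · rw [pvScan_step l i (by omega), h i]
        exact ih (i+1) (by omega)
      · rw [scanA, dif_neg hlt]
  exact main (l.length - 2 - i) i le_rfl

theorem pvScan_finds (l : List String) (i0 : Nat) (d : String)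
    (hd : pvRedexAt l i0 = some d)
    (hmin : ∀ j, j < i0 → pvRedexAt l j = none) :
    scanA l 0 = some (((l.set i0 d).set (i0+1) "NULL").set (i0+2) "NULL") := by
  have hlen : i0 + 2 < l.length := by
    by_contra hc
    rw [pvRedexAt_short (by omega)] at hd; cases hd
  have main : ∀ (k i : Nat), i0 - i ≤ k → i ≤ i0 →
      scanA l i = some (((l.set i0 d).set (i0+1) "NULL").set (i0+2) "NULL") := by
    intro k
    induction k with
    | zero =>
      intro i hk hi
      have : i = i0 := by omega
      subst this
      rw [pvScan_step l i (by omega), hd]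
    | succ k ih =>
      intro i hk hi
      by_cases he : i = i0
      · subst he; rw [pvScan_step l i (by omega), hd]
      · rw [pvScan_step l i (by omega), hmin i (by omega)]
        exact ih (i+1) (by omega) (by omega)
  exact main i0 0 (by omega) (by omega)

theorem pvSetTriple (a b c d : String) (v : List String) : ∀ u : List String,
    (((u ++ a :: b :: c :: v).set u.length d).set (u.length+1) "NULL").set (u.length+2) "NULL"
      = u ++ d :: "NULL" :: "NULL" :: v := by
  intro u
  induction u with
  | nil => rfl
  | cons x u ih => simp [List.set_cons_succ]

theorem pvRemoveAppend {u w : List String} {v : String} (h : v ∉ u) :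
    PySem.List.remove? (u ++ w) v = (PySem.List.remove? w v).map (u ++ ·) := by
  induction u with
  | nil => simp
  | cons x u ih =>
    have hx : x ≠ v := by intro e; exact h (by simp [e])
    rw [List.cons_append, PySem.List.remove?_cons_of_ne (u ++ w) hx,
        ih (by intro hm; exact h (by simp [hm]))]
    cases PySem.List.remove? w v <;> simp

theorem pvNF_fix {l : List String} (h : pvNF l) : pathsortener l = l := by
  have hs : scanA l 0 = none := pvScan_none l h 0
  unfold pathsortener
  exact pvLoopNone _ _ hs

-- A reduces its leftmost matching window
theorem pvAStep {u v : List String} {a b c d : String}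
    (hNF : ∀ j, j < u.length → pvRedexAt (u ++ a :: b :: c :: v) j = none)
    (hr : rule a b c = some d)
    (hnull : "NULL" ∉ u ++ a :: b :: c :: v) :
    pathsortener (u ++ a :: b :: c :: v) = pathsortener (u ++ d :: v) := by
  have hnu : "NULL" ∉ u := fun hm => hnull (List.mem_append_left _ hm)
  have hdne : d ≠ "NULL" := pvRule_ne_null hr
  have hred : pvRedexAt (u ++ a :: b :: c :: v) u.length = some d := by
    unfold pvRedexAt; rw [List.drop_left]; exact hr
  have hscan : scanA (u ++ a :: b :: c :: v) 0
      = some (u ++ d :: "NULL" :: "NULL" :: v) := by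
    have := pvScan_finds (u ++ a :: b :: c :: v) u.length d hred hNF
    rw [pvSetTriple a b c d v u] at this
    exact this
  have hrm1 : PySem.List.remove? (u ++ d :: "NULL" :: "NULL" :: v) "NULL"
      = some (u ++ d :: "NULL" :: v) := by
    rw [pvRemoveAppend hnu, PySem.List.remove?_cons_of_ne _ hdne,
        PySem.List.remove?_cons_self]
    rfl
  have hrm2 : PySem.List.remove? (u ++ d :: "NULL" :: v) "NULL"
      = some (u ++ d :: v) := by
    rw [pvRemoveAppend hnu, PySem.List.remove?_cons_of_ne _ hdne,
        PySem.List.remove?_cons_self]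
    rfl
  unfold pathsortener
  rw [pvLoopSome _ _ _ _ _ hscan hrm1 hrm2]
  have hl1 : (u ++ a :: b :: c :: v).length = (u.length + v.length + 2) + 1 := by
    simp [List.length_append]; omega
  have hl2 : (u ++ d :: v).length + 1 = (u.length + v.length + 1) + 1 := by
    simp [List.length_append]; omega
  rw [hl1, hl2]
  exact pvLoopStable (u.length + v.length + 2) (u ++ d :: v)
    (by simp only [List.length_append, List.length_cons]; omega)

-- the no-reduction case of pushing a symbol, shared by pvPush's branches
theorem pvPushNoFire {s : List String} {x : String} {rest : List String}
    (hid : reduceTop (x :: s) = x :: s)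
    (hsnoc : ∀ a b, s.reverse.drop (s.reverse.length - 2) = [a, b] → rule a b x = none)
    (hNF : pvNF s.reverse) (hnull : "NULL" ∉ s.reverse ++ x :: rest) :
    pathsortener (s.reverse ++ x :: rest)
        = pathsortener ((reduceTop (x :: s)).reverse ++ rest)
      ∧ pvNF (reduceTop (x :: s)).reverse
      ∧ "NULL" ∉ reduceTop (x :: s) := by
  have hrev : (x :: s).reverse = s.reverse ++ [x] := by simp
  refine ⟨?_, ?_, ?_⟩
  · rw [hid, hrev, List.append_assoc]; rfl
  · rw [hid, hrev]; exact pvNF_snoc hNF hsnoc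
  · rw [hid]
    intro hm
    simp only [List.mem_append, List.mem_cons, List.mem_reverse] at hnull
    rcases List.mem_cons.mp hm with hm | hm
    · exact hnull (Or.inr (Or.inl hm))
    · exact hnull (Or.inl (by simpa using hm))

-- the crux: pushing one symbol onto an irreducible stack tracks A's reductions
theorem pvPush : ∀ (n : Nat) (s : List String) (x : String) (rest : List String),
    s.length ≤ n → pvNF s.reverse → "NULL" ∉ s.reverse ++ x :: rest →
    pathsortener (s.reverse ++ x :: rest)
        = pathsortener ((reduceTop (x :: s)).reverse ++ rest)
      ∧ pvNF (reduceTop (x :: s)).reverse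
      ∧ "NULL" ∉ reduceTop (x :: s) := by
  intro n
  induction n with
  | zero =>
    intro s x rest hn hNF hnull
    have hs : s = [] := by cases s <;> simp_all
    subst hs
    exact pvPushNoFire (by rw [reduceTop]; intro c b a t h; simp at h) (by intro a b hab; simp at hab) hNF hnull
  | succ n ih =>
    intro s x rest hn hNF hnull
    match s with
    | [] =>
      exact pvPushNoFire (by rw [reduceTop]; intro c b a t h; simp at h) (by intro a b hab; simp at hab) hNF hnull
    | [y] =>
      exact pvPushNoFire (by rw [reduceTop]; intro c b a t h; simp at h) (by intro a b hab; simp at hab) hNF hnull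
    | b0 :: a0 :: t =>
      cases hr : rule a0 b0 x with
      | none =>
        refine pvPushNoFire (by rw [reduceTop]; simp [hr]) ?_ hNF hnull
        intro a b hab
        have hdrop : (b0 :: a0 :: t).reverse.drop ((b0 :: a0 :: t).reverse.length - 2)
            = [a0, b0] := by
          have : (b0 :: a0 :: t).reverse = t.reverse ++ [a0, b0] := by simp
          rw [this]
          have h2 : (t.reverse ++ [a0, b0]).length - 2 = t.reverse.length := by simp
          rw [h2, List.drop_left]
        rw [hdrop] at hab
        injection hab with h1 hab; injection hab with h2 _
        subst h1; subst h2
        exact hr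
      | some d =>
        have hsrev : (b0 :: a0 :: t).reverse ++ x :: rest
            = t.reverse ++ a0 :: b0 :: x :: rest := by simp
        have hNFt : pvNF t.reverse :=
          pvNF_of_append (r := [a0, b0]) (by
            have : t.reverse ++ [a0, b0] = (b0 :: a0 :: t).reverse := by simp
            rw [this]; exact hNF)
        have hnull' : "NULL" ∉ t.reverse ++ a0 :: b0 :: x :: rest := by
          rw [← hsrev]; exact hnull
        have hstep : pathsortener (t.reverse ++ a0 :: b0 :: x :: rest)
            = pathsortener (t.reverse ++ d :: rest) := by
          apply pvAStep (d := d) _ hr hnull'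
          intro j hj
          have hcast : t.reverse ++ a0 :: b0 :: x :: rest
              = (b0 :: a0 :: t).reverse ++ x :: rest := hsrev.symm
          rw [hcast, pvRedexAt_append (by
            simp only [List.length_reverse, List.length_cons]
            simp only [List.length_reverse] at hj
            omega)]
          exact hNF j
        have hred : reduceTop (x :: b0 :: a0 :: t) = reduceTop (d :: t) := by
          rw [reduceTop]; simp [hr]
        have hnullt : "NULL" ∉ t.reverse ++ d :: rest := by
          intro hm
          simp only [List.mem_append, List.mem_cons, List.mem_reverse] at hm hnull
          rcases hm with hm | hm | hm
          · exact hnull (Or.inl (by simp [hm]))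
          · exact pvRule_ne_null hr hm.symm
          · exact hnull (Or.inr (Or.inr hm))
        obtain ⟨ih1, ih2, ih3⟩ := ih t d rest (by simp only [List.length_cons] at hn; omega) hNFt hnullt
        refine ⟨?_, ?_, ?_⟩
        · rw [hsrev, hstep, ih1, hred]
        · rw [hred]; exact ih2
        · rw [hred]; exact ih3

theorem pvMain : ∀ (rest s : List String), pvNF s.reverse →
    "NULL" ∉ s.reverse ++ rest →
    pathsortener (s.reverse ++ rest)
      = (rest.foldl (fun st sym => reduceTop (sym :: st)) s).reverse := by
  intro rest
  induction rest with
  | nil =>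
    intro s hNF _
    simpa using pvNF_fix hNF
  | cons x rest ih =>
    intro s hNF hnull
    obtain ⟨h1, h2, h3⟩ := pvPush s.length s x rest le_rfl hNF hnull
    rw [List.foldl_cons, h1, ih _ h2]
    simp only [List.mem_append] at hnull ⊢
    intro hm
    rcases hm with hm | hm
    · exact h3 (by simpa using hm)
    · exact hnull (Or.inr (by simp [hm]))

-- ===== VERDICT (by name: the statement is the Claim_ definition above) =====
theorem pathsortener_spec : Claim_equal_pathsortener := by
  intro path _ hpre
  unfold Spec_pathsortener pathsortener_alt
  have := pvMain path [] (by intro j; exact pvRedexAt_short (by simp)) (by simpa using hpre)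
  simpa using this
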